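-- pv_equiv track=rewrite | github.com/iamjedi888/ver-perlinforge | islandforge/channels_page.py | _detect_embed
-- ===== SOURCE A (Python) =====
-- def _detect_embed(url: str) -> str:
--     """Convert stream URL to embeddable iframe src."""
--     if not url:
--         return ""
--     u = url.strip()
--
--     # Twitch channel  e.g. https://twitch.tv/ninja
--     if "twitch.tv/" in u and "/videos/" not in u:
--         channel = u.split("twitch.tv/")[-1].split("?")[0].split("/")[0]
--         return f"https://player.twitch.tv/?channel={channel}&parent=triptokforge.org&autoplay=false&muted=false"
--
--     # Twitch VOD
--     if "twitch.tv/videos/" in u: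
--         vid = u.split("/videos/")[-1].split("?")[0]
--         return f"https://player.twitch.tv/?video={vid}&parent=triptokforge.org&autoplay=false"
--
--     # YouTube watch
--     if "youtube.com/watch" in u:
--         vid = ""
--         for part in u.split("?")[-1].split("&"):
--             if part.startswith("v="):
--                 vid = part[2:]
--         if vid:
--             return f"https://www.youtube.com/embed/{vid}?autoplay=0"
--
--     # YouTube short URL
--     if "youtu.be/" in u:
--         vid = u.split("youtu.be/")[-1].split("?")[0]
--         return f"https://www.youtube.com/embed/{vid}?autoplay=0"
--
--     # YouTube live / channel page — link-out only
--     if "youtube.com/@" in u or "youtube.com/c/" in u or "youtube.com/channel/" in u: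
--         return u
--
--     # Kick
--     if "kick.com/" in u:
--         channel = u.split("kick.com/")[-1].split("?")[0].split("/")[0]
--         return f"https://player.kick.com/{channel}?autoplay=false"
--
--     # Streamable
--     if "streamable.com/" in u:
--         vid = u.split("streamable.com/")[-1].split("?")[0]
--         return f"https://streamable.com/e/{vid}"
--
--     # Already an embed or unknown — pass through
--     return u
-- ===== SOURCE B (Python) =====
-- def _tail(s, m):
--     """Suffix of s after the last greedily-consumed occurrence of m (s if absent)."""
--     i = s.find(m)
--     while i >= 0:
--         s = s[i + len(m):]
--         i = s.find(m)
--     return s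
--
--
-- def _head(s, m):
--     """Prefix of s before the first occurrence of m (s if absent)."""
--     i = s.find(m)
--     return s if i < 0 else s[:i]
--
--
-- def _twitch(u):
--     if "twitch.tv/" not in u:
--         return None
--     if "/videos/" not in u:
--         channel = _head(_head(_tail(u, "twitch.tv/"), "?"), "/")
--         return f"https://player.twitch.tv/?channel={channel}&parent=triptokforge.org&autoplay=false&muted=false"
--     if "twitch.tv/videos/" in u:
--         vid = _head(_tail(u, "/videos/"), "?")
--         return f"https://player.twitch.tv/?video={vid}&parent=triptokforge.org&autoplay=false"
--     return None
--
--
-- def _youtube(u):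
--     if "youtube.com/watch" in u:
--         for part in reversed(_tail(u, "?").split("&")):
--             if part.startswith("v="):
--                 if part[2:]:
--                     return f"https://www.youtube.com/embed/{part[2:]}?autoplay=0"
--                 break
--     if "youtu.be/" in u:
--         vid = _head(_tail(u, "youtu.be/"), "?")
--         return f"https://www.youtube.com/embed/{vid}?autoplay=0"
--     if "youtube.com/@" in u or "youtube.com/c/" in u or "youtube.com/channel/" in u:
--         return u
--     return None
--
--
-- def _other(u):
--     if "kick.com/" in u:
--         channel = _head(_head(_tail(u, "kick.com/"), "?"), "/")
--         return f"https://player.kick.com/{channel}?autoplay=false"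
--     if "streamable.com/" in u:
--         vid = _head(_tail(u, "streamable.com/"), "?")
--         return f"https://streamable.com/e/{vid}"
--     return None
--
--
-- def _detect_embed(url: str) -> str:
--     """Convert stream URL to embeddable iframe src."""
--     if not url:
--         return ""
--     u = url.strip()
--     r = _twitch(u)
--     if r is None:
--         r = _youtube(u)
--     if r is None:
--         r = _other(u)
--     return u if r is None else r
-- ===== Notes on version B (the rewrite author's own statement) =====
-- stated objective: alternative
-- what changed: Extraction no longer uses split(marker) chains: helper loops over str.find with slicing (_tail greedily jumps past occurrences, _head cuts at the first hit) replace split()[-1]/[0] indexing, the v= parameter is found by a reversed early-exit scan instead of A's forward overwrite fold, and dispatch is regrouped into Optional-returning per-site helpers chained by the caller.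
import Mathlib
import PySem

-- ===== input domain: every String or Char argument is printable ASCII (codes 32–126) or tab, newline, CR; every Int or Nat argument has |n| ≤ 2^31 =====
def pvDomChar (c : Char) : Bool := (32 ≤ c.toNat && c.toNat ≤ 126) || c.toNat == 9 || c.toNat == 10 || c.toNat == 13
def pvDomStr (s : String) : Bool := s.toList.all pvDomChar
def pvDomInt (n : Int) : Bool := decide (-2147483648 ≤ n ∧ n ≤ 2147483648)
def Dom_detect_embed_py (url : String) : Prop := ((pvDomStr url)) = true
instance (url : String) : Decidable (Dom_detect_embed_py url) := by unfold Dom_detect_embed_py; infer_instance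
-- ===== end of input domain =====

-- B replaces A's split(marker)-chain extractions by find/slice loops (_tail/_head), the v= param
-- by a reversed early-exit scan instead of A's forward overwrite fold, and regroups the dispatch
-- into Option-returning per-site helpers (objective: alternative; same cost).

-- ===== PORT A =====
-- s.split(sep) for a NONEMPTY literal sep: split? is always `some` there, so getD [] is exact
def pvSplit (s sep : String) : List String := (PySem.Str.split? s sep).getD []

-- the shared fall-through tail of A's if-chain (Python's sequential ifs after the YouTube-watch
-- branch, which can fall through when no "v=" part is found)
def pvRestA (u : String) : String :=
  if PySem.Str.isIn "youtu.be/" u then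
    let vid := (pvSplit ((pvSplit u "youtu.be/").getLastD "") "?").headD ""
    PySem.Str.join "" ["https://www.youtube.com/embed/", vid, "?autoplay=0"]
  else if PySem.Str.isIn "youtube.com/@" u || PySem.Str.isIn "youtube.com/c/" u || PySem.Str.isIn "youtube.com/channel/" u then
    u
  else if PySem.Str.isIn "kick.com/" u then
    let channel := (pvSplit ((pvSplit ((pvSplit u "kick.com/").getLastD "") "?").headD "") "/").headD ""
    PySem.Str.join "" ["https://player.kick.com/", channel, "?autoplay=false"]
  else if PySem.Str.isIn "streamable.com/" u then
    let vid := (pvSplit ((pvSplit u "streamable.com/").getLastD "") "?").headD ""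
    PySem.Str.join "" ["https://streamable.com/e/", vid]
  else u

-- A's if-chain, transliterated branch for branch; lst[-1]/lst[0] on results of split are
-- exact as getLastD/headD since Python's str.split never returns an empty list.
def detect_embed_py (url : String) : String :=
  if url == "" then "" else
  let u := PySem.Str.strip url
  if PySem.Str.isIn "twitch.tv/" u && !(PySem.Str.isIn "/videos/" u) then
    let channel := (pvSplit ((pvSplit ((pvSplit u "twitch.tv/").getLastD "") "?").headD "") "/").headD ""
    PySem.Str.join "" ["https://player.twitch.tv/?channel=", channel, "&parent=triptokforge.org&autoplay=false&muted=false"]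
  else if PySem.Str.isIn "twitch.tv/videos/" u then
    let vid := (pvSplit ((pvSplit u "/videos/").getLastD "") "?").headD ""
    PySem.Str.join "" ["https://player.twitch.tv/?video=", vid, "&parent=triptokforge.org&autoplay=false"]
  else if PySem.Str.isIn "youtube.com/watch" u then
    let vid := (pvSplit ((pvSplit u "?").getLastD "") "&").foldl
      (fun vid part => if PySem.Str.startswith part "v=" then PySem.Str.slice part (some 2) none else vid) ""
    if !(vid == "") then PySem.Str.join "" ["https://www.youtube.com/embed/", vid, "?autoplay=0"]
    else pvRestA u
  else pvRestA u

-- ===== PORT B =====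
-- helper _tail of Source B: loop "i = s.find(m); while i >= 0: s = s[i+len(m):]; i = s.find(m)"
-- (the two extra conjuncts of the guard only make the recursion total; for 0 ≤ i and m ≠ ""
-- they always hold, and Source B never calls _tail with m = "")
def pvTailC (s m : List Char) : List Char :=
  let i := PySem.Chars.find s m
  if _h : 0 ≤ i ∧ 0 < m.length ∧ i.toNat + m.length ≤ s.length then
    pvTailC (s.drop (i.toNat + m.length)) m
  else s
termination_by s.length
decreasing_by simp only [List.length_drop]; omega

-- helper _head of Source B: "i = s.find(m); return s if i < 0 else s[:i]"
def pvHeadC (s m : List Char) : List Char :=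
  let i := PySem.Chars.find s m
  if i < 0 then s else s.take i.toNat

def pvTailS (s m : String) : String := String.ofList (pvTailC s.toList m.toList)
def pvHeadS (s m : String) : String := String.ofList (pvHeadC s.toList m.toList)

-- Source B's "for part in reversed(...): if part.startswith('v='): ..." — first match of the reversed list
def pvFirstV : List String → Option String
  | [] => none
  | p :: t => if PySem.Str.startswith p "v=" then some p else pvFirstV t

-- helper _twitch of Source B
def pvTwitch (u : String) : Option String :=
  if !(PySem.Str.isIn "twitch.tv/" u) then none
  else if !(PySem.Str.isIn "/videos/" u) then
    some (PySem.Str.join "" ["https://player.twitch.tv/?channel=",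
      pvHeadS (pvHeadS (pvTailS u "twitch.tv/") "?") "/",
      "&parent=triptokforge.org&autoplay=false&muted=false"])
  else if PySem.Str.isIn "twitch.tv/videos/" u then
    some (PySem.Str.join "" ["https://player.twitch.tv/?video=",
      pvHeadS (pvTailS u "/videos/") "?",
      "&parent=triptokforge.org&autoplay=false"])
  else none

-- helper _youtube of Source B ("break" on an empty v= value exits the loop and falls to the next if)
def pvYoutube (u : String) : Option String :=
  let fromWatch : Option String :=
    if PySem.Str.isIn "youtube.com/watch" u then
      match pvFirstV (((PySem.Str.split? (pvTailS u "?") "&").getD []).reverse) with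
      | some p =>
        if !(PySem.Str.slice p (some 2) none == "") then
          some (PySem.Str.join "" ["https://www.youtube.com/embed/", PySem.Str.slice p (some 2) none, "?autoplay=0"])
        else none
      | none => none
    else none
  match fromWatch with
  | some r => some r
  | none =>
    if PySem.Str.isIn "youtu.be/" u then
      some (PySem.Str.join "" ["https://www.youtube.com/embed/", pvHeadS (pvTailS u "youtu.be/") "?", "?autoplay=0"])
    else if PySem.Str.isIn "youtube.com/@" u || PySem.Str.isIn "youtube.com/c/" u || PySem.Str.isIn "youtube.com/channel/" u then
      some u
    else none

-- helper _other of Source B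
def pvOther (u : String) : Option String :=
  if PySem.Str.isIn "kick.com/" u then
    some (PySem.Str.join "" ["https://player.kick.com/",
      pvHeadS (pvHeadS (pvTailS u "kick.com/") "?") "/", "?autoplay=false"])
  else if PySem.Str.isIn "streamable.com/" u then
    some (PySem.Str.join "" ["https://streamable.com/e/", pvHeadS (pvTailS u "streamable.com/") "?"])
  else none

def detect_embed_py_alt (url : String) : String :=
  if url == "" then "" else
  let u := PySem.Str.strip url
  let r := match pvTwitch u with
    | some x => some x
    | none => match pvYoutube u with
      | some x => some x
      | none => pvOther u
  match r with
  | some x => x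
  | none => u

-- ===== PRECONDITION & SPEC =====
def Spec_detect_embed_py (url : String) (out : String) : Prop := out = detect_embed_py_alt url
instance (url : String) (out : String) : Decidable (Spec_detect_embed_py url out) := by unfold Spec_detect_embed_py; infer_instance

-- ===== CLAIM (what is proved, stated in full; the proofs are below) =====
def Claim_equal_detect_embed_py : Prop := ∀ (url : String), Dom_detect_embed_py url → Spec_detect_embed_py url (detect_embed_py url)

-- ===== LEMMAS AND PROOFS =====

lemma pv_find_nil (sub : List Char) :
    PySem.Chars.find [] sub = if sub.isEmpty then 0 else -1 := by
  simp only [PySem.Chars.find]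
  rw [PySem.Chars.find.go.eq_def]
  by_cases h : sub.isEmpty <;> simp [h]

lemma pv_find_cons_prefix {sub : List Char} {c : Char} {t : List Char}
    (h : sub.isPrefixOf (c :: t) = true) : PySem.Chars.find (c :: t) sub = 0 := by
  simp only [PySem.Chars.find]
  rw [PySem.Chars.find.go.eq_def]
  simp [h]

lemma pv_find_go (sub : List Char) : ∀ (l : List Char) (k : Nat),
    PySem.Chars.find.go sub l k =
      if PySem.Chars.find l sub = -1 then -1 else PySem.Chars.find l sub + k := by
  intro l
  induction l with
  | nil =>
    intro k
    rw [PySem.Chars.find.go.eq_def, pv_find_nil]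
    by_cases h : sub.isEmpty <;> simp [h]
  | cons c t ih =>
    intro k
    rw [PySem.Chars.find.go.eq_def]
    by_cases h : sub.isPrefixOf (c :: t)
    · rw [pv_find_cons_prefix h]; simp [h]
    · have hr : PySem.Chars.find (c :: t) sub = PySem.Chars.find.go sub t 1 := by
        simp only [PySem.Chars.find]
        rw [PySem.Chars.find.go.eq_def]
        simp [h]
      simp only [h, if_false, Bool.false_eq_true]
      rw [hr, ih 1, ih (k+1)]
      by_cases h2 : PySem.Chars.find t sub = -1
      · simp [h2]
      · have h3 := PySem.Chars.neg_one_le_find t sub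
        have h4 : ¬ (PySem.Chars.find t sub + (1:Int) = -1) := by omega
        rw [if_neg h2, if_neg h2]
        push_cast [if_neg h4]
        ring

lemma pv_find_cons_not {sub : List Char} {c : Char} {t : List Char}
    (h : ¬ sub.isPrefixOf (c :: t) = true) :
    PySem.Chars.find (c :: t) sub =
      if PySem.Chars.find t sub = -1 then -1 else PySem.Chars.find t sub + 1 := by
  conv_lhs => simp only [PySem.Chars.find]; rw [PySem.Chars.find.go.eq_def]
  simp only [h, if_false, Bool.false_eq_true]
  rw [pv_find_go]
  by_cases h2 : PySem.Chars.find t sub = -1 <;> simp [h2]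

lemma pv_find_fit {s m : List Char} (h : 0 ≤ PySem.Chars.find s m) :
    (PySem.Chars.find s m).toNat + m.length ≤ s.length := by
  have hs := (PySem.Chars.find_spec h).1
  have := hs.length_le
  simp only [List.length_drop] at this
  have h2 := PySem.Chars.find_le_length s m
  omega

lemma pv_tail_stop {s m : List Char} (h : PySem.Chars.find s m < 0) : pvTailC s m = s := by
  have hng : ¬ (0 ≤ PySem.Chars.find s m ∧ 0 < m.length ∧ (PySem.Chars.find s m).toNat + m.length ≤ s.length) := by
    rintro ⟨h1, -, -⟩; omega
  rw [pvTailC]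
  exact dif_neg hng

lemma pv_tail_step {s m : List Char} (hm : m ≠ []) (h : 0 ≤ PySem.Chars.find s m) :
    pvTailC s m = pvTailC (s.drop ((PySem.Chars.find s m).toNat + m.length)) m := by
  have hfit := pv_find_fit h
  have hml : 0 < m.length := List.length_pos_of_ne_nil hm
  have hc : (0 ≤ PySem.Chars.find s m ∧ 0 < m.length ∧ (PySem.Chars.find s m).toNat + m.length ≤ s.length) := ⟨h, hml, hfit⟩
  conv_lhs => rw [pvTailC]
  exact dif_pos hc

lemma pv_go_nil (sep : List Char) (fuel : Nat) (cur : List Char) (acc : List (List Char)) :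
    PySem.Chars.splitOn.go sep (fuel+1) [] cur acc = (cur.reverse :: acc).reverse := by
  rw [PySem.Chars.splitOn.go.eq_def]

lemma pv_go_cons (sep : List Char) (fuel : Nat) (c : Char) (rest cur : List Char) (acc : List (List Char)) :
    PySem.Chars.splitOn.go sep (fuel+1) (c :: rest) cur acc =
      if sep.isPrefixOf (c :: rest) then
        PySem.Chars.splitOn.go sep fuel (List.drop sep.length (c :: rest)) [] (cur.reverse :: acc)
      else PySem.Chars.splitOn.go sep fuel rest (c :: cur) acc := by
  rw [PySem.Chars.splitOn.go.eq_def]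

lemma pv_go_getLastD {sep : List Char} (hsep : sep ≠ []) :
    ∀ (fuel : Nat) (l cur : List Char) (acc : List (List Char)) (d : List Char),
      l.length < fuel →
      (PySem.Chars.splitOn.go sep fuel l cur acc).getLastD d =
        if 0 ≤ PySem.Chars.find l sep then pvTailC l sep else cur.reverse ++ l := by
  intro fuel
  induction fuel with
  | zero => intro l cur acc d hl; omega
  | succ n ih =>
    intro l cur acc d hl
    cases l with
    | nil =>
      rw [pv_go_nil, pv_find_nil]
      have hne : ¬ sep.isEmpty = true := by simp [List.isEmpty_iff, hsep]
      rw [if_neg hne, if_neg (by omega : ¬ ((0:Int) ≤ -1))]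
      simp [List.getLastD_eq_getLast?, List.getLast?_reverse]
    | cons c rest =>
      rw [pv_go_cons]
      by_cases hp : sep.isPrefixOf (c :: rest)
      · rw [if_pos hp]
        have hplen : sep.length ≤ (c :: rest).length :=
          (List.isPrefixOf_iff_prefix.mp hp).length_le
        have hlen : (List.drop sep.length (c :: rest)).length < n := by
          simp only [List.length_drop]
          have : 0 < sep.length := List.length_pos_of_ne_nil hsep
          simp only [List.length_cons] at hl ⊢
          omega
        rw [ih _ [] _ d hlen]
        have hf0 : PySem.Chars.find (c :: rest) sep = 0 := pv_find_cons_prefix hp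
        rw [if_pos hf0.ge]
        rw [pv_tail_step hsep hf0.ge, hf0]
        simp only [Int.toNat_zero, Nat.zero_add, List.reverse_nil, List.nil_append]
        by_cases hd : 0 ≤ PySem.Chars.find (List.drop sep.length (c :: rest)) sep
        · rw [if_pos hd]
        · rw [if_neg hd]
          rw [pv_tail_stop (by omega)]
      · rw [if_neg hp]
        have hlen : rest.length < n := by simp only [List.length_cons] at hl; omega
        rw [ih _ _ _ d hlen]
        rw [pv_find_cons_not hp]
        by_cases h2 : PySem.Chars.find rest sep = -1
        · have hneg : PySem.Chars.find rest sep < 0 := by omega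
          rw [if_neg (by omega), if_pos h2, if_neg (by omega)]
          simp
        · have h3 := PySem.Chars.neg_one_le_find rest sep
          have hge : 0 ≤ PySem.Chars.find rest sep := by omega
          rw [if_pos hge, if_neg h2, if_pos (by omega)]
          -- pvTailC (c :: rest) sep = pvTailC rest sep when sep does not start at 0
          have hc : PySem.Chars.find (c :: rest) sep = PySem.Chars.find rest sep + 1 := by
            rw [pv_find_cons_not hp, if_neg h2]
          have hge' : 0 ≤ PySem.Chars.find (c :: rest) sep := by omega
          have heq : pvTailC (c :: rest) sep = pvTailC rest sep := by
            rw [pv_tail_step hsep hge', pv_tail_step hsep hge]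
            congr 1
            rw [hc]
            have ht : (PySem.Chars.find rest sep + 1).toNat = (PySem.Chars.find rest sep).toNat + 1 := by omega
            rw [ht, Nat.add_right_comm]
            rfl
          exact heq.symm

lemma pv_head_nil {m : List Char} (hm : m ≠ []) : pvHeadC [] m = [] := by
  rw [pvHeadC, pv_find_nil]
  have hne : ¬ m.isEmpty = true := by simp [List.isEmpty_iff, hm]
  rw [if_neg hne]
  norm_num

lemma pv_head_prefix {sep : List Char} {c : Char} {rest : List Char}
    (hp : sep.isPrefixOf (c :: rest) = true) : pvHeadC (c :: rest) sep = [] := by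
  rw [pvHeadC, pv_find_cons_prefix hp]
  norm_num

lemma pv_head_not {sep : List Char} {c : Char} {rest : List Char}
    (hp : ¬ sep.isPrefixOf (c :: rest) = true) :
    pvHeadC (c :: rest) sep = c :: pvHeadC rest sep := by
  rw [pvHeadC, pvHeadC, pv_find_cons_not hp]
  by_cases h2 : PySem.Chars.find rest sep = -1
  · rw [if_pos h2]
    have : PySem.Chars.find rest sep < 0 := by omega
    rw [if_pos (by omega : (-1:Int) < 0), if_pos this]
  · have h3 := PySem.Chars.neg_one_le_find rest sep
    have hge : 0 ≤ PySem.Chars.find rest sep := by omega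
    rw [if_neg h2, if_neg (by omega), if_neg (by omega)]
    have ht : (PySem.Chars.find rest sep + 1).toNat = (PySem.Chars.find rest sep).toNat + 1 := by omega
    rw [ht, List.take_succ_cons]

lemma pv_go_headD {sep : List Char} (hsep : sep ≠ []) :
    ∀ (fuel : Nat) (l cur : List Char) (acc : List (List Char)) (d : List Char),
      l.length < fuel →
      (PySem.Chars.splitOn.go sep fuel l cur acc).headD d =
        acc.getLastD (cur.reverse ++ pvHeadC l sep) := by
  intro fuel
  induction fuel with
  | zero => intro l cur acc d hl; omega
  | succ n ih =>
    intro l cur acc d hl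
    cases l with
    | nil =>
      rw [pv_go_nil, pv_head_nil hsep, List.append_nil]
      simp [List.headD_eq_head?_getD, List.head?_reverse, List.getLastD_eq_getLast?]
    | cons c rest =>
      rw [pv_go_cons]
      by_cases hp : sep.isPrefixOf (c :: rest)
      · rw [if_pos hp]
        have hplen : sep.length ≤ (c :: rest).length :=
          (List.isPrefixOf_iff_prefix.mp hp).length_le
        have hlen : (List.drop sep.length (c :: rest)).length < n := by
          simp only [List.length_drop]
          have : 0 < sep.length := List.length_pos_of_ne_nil hsep
          simp only [List.length_cons] at hl ⊢
          omega
        rw [ih _ [] _ d hlen]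
        rw [pv_head_prefix hp, List.append_nil]
        cases acc <;> simp [List.getLast?_cons, List.getLastD_eq_getLast?]
      · rw [if_neg hp]
        have hlen : rest.length < n := by simp only [List.length_cons] at hl; omega
        rw [ih _ _ _ d hlen, pv_head_not hp]
        simp [List.append_assoc]

lemma pv_splitOn_getLastD {s sep : List Char} (hsep : sep ≠ []) (d : List Char) :
    (PySem.Chars.splitOn s sep).getLastD d = pvTailC s sep := by
  have h := pv_go_getLastD hsep (s.length+1) s [] [] d (by omega)
  rw [PySem.Chars.splitOn]
  rw [h]
  by_cases hf : 0 ≤ PySem.Chars.find s sep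
  · rw [if_pos hf]
  · rw [if_neg hf, pv_tail_stop (by omega)]
    simp

lemma pv_splitOn_headD {s sep : List Char} (hsep : sep ≠ []) (d : List Char) :
    (PySem.Chars.splitOn s sep).headD d = pvHeadC s sep := by
  have h := pv_go_headD hsep (s.length+1) s [] [] d (by omega)
  rw [PySem.Chars.splitOn, h]
  simp

lemma pv_split_some (s sep : String) (h : sep.toList ≠ []) :
    PySem.Str.split? s sep = some ((PySem.Chars.splitOn s.toList sep.toList).map String.ofList) := by
  have hm := PySem.Str.split?_map s sep
  rw [PySem.Chars.split?] at hm
  rw [if_neg (by simp [List.isEmpty_iff, h])] at hm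
  cases hsp : PySem.Str.split? s sep with
  | none => rw [hsp] at hm; simp at hm
  | some parts =>
    rw [hsp] at hm
    simp only [Option.map_some, Option.some.injEq] at hm
    congr 1
    rw [← hm, List.map_map]
    simp [Function.comp_def]

lemma pv_E1 (s sep : String) (h : sep.toList ≠ []) :
    (pvSplit s sep).getLastD "" = pvTailS s sep := by
  rw [pvSplit, pv_split_some s sep h, Option.getD_some, pvTailS]
  have : ("" : String) = String.ofList [] := rfl
  rw [this, List.getLastD_map, pv_splitOn_getLastD h]

lemma pv_E2 (s sep : String) (h : sep.toList ≠ []) :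
    (pvSplit s sep).headD "" = pvHeadS s sep := by
  rw [pvSplit, pv_split_some s sep h, Option.getD_some, pvHeadS]
  have : ("" : String) = String.ofList [] := rfl
  rw [this]
  cases hsp : PySem.Chars.splitOn s.toList sep.toList with
  | nil => rw [← pv_splitOn_headD h []]; rw [hsp]; rfl
  | cons p t => simp only [List.map_cons, List.headD_cons]
                rw [← pv_splitOn_headD h [], hsp, List.headD_cons]

lemma pv_Y (parts : List String) :
    parts.foldl (fun vid part => if PySem.Str.startswith part "v=" then PySem.Str.slice part (some 2) none else vid) "" =
      (match pvFirstV parts.reverse with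
        | some p => PySem.Str.slice p (some 2) none
        | none => "") := by
  rw [← List.reverse_reverse parts]
  generalize parts.reverse = rs
  rw [List.reverse_reverse]
  induction rs with
  | nil => rfl
  | cons x t ih =>
    rw [List.reverse_cons, List.foldl_append, pvFirstV]
    simp only [List.foldl_cons, List.foldl_nil]
    by_cases hx : PySem.Str.startswith x "v="
    · rw [if_pos hx, if_pos hx]
    · rw [if_neg hx, if_neg hx, ih]

lemma pv_isIn_mono {sub sub' s : String} (hs : sub'.toList <:+: sub.toList)
    (h : PySem.Str.isIn sub s = true) : PySem.Str.isIn sub' s = true := by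
  rw [PySem.Str.isIn_iff_infix] at h ⊢
  exact hs.trans h

-- re-associating the two Option fall-through chains
lemma pv_match_assoc (x y : Option String) (u : String) :
    (match x with | some r => r | none => (match y with | some v => v | none => u)) =
    (match (match x with | some r => some r | none => y) with | some v => v | none => u) := by
  cases x <;> rfl

-- the fall-through tail: A's pvRestA versus B's youtu.be-onwards Option chain
lemma pv_restA_eq (u : String) :
    pvRestA u =
      (match (if PySem.Str.isIn "youtu.be/" u then
                some (PySem.Str.join "" ["https://www.youtube.com/embed/", pvHeadS (pvTailS u "youtu.be/") "?", "?autoplay=0"])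
              else if PySem.Str.isIn "youtube.com/@" u || PySem.Str.isIn "youtube.com/c/" u || PySem.Str.isIn "youtube.com/channel/" u then
                some u
              else none : Option String) with
       | some r => r
       | none => (match pvOther u with | some x => x | none => u)) := by
  simp only [pvRestA, pvOther]
  by_cases c5 : PySem.Str.isIn "youtu.be/" u
  · rw [if_pos c5, if_pos c5, pv_E1 u "youtu.be/" (by decide), pv_E2 _ "?" (by decide)]
  · rw [if_neg c5, if_neg c5]
    by_cases c6 : (PySem.Str.isIn "youtube.com/@" u || PySem.Str.isIn "youtube.com/c/" u || PySem.Str.isIn "youtube.com/channel/" u) = true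
    · rw [if_pos c6, if_pos c6]
    · rw [if_neg c6, if_neg c6]
      by_cases c7 : PySem.Str.isIn "kick.com/" u
      · rw [if_pos c7, if_pos c7, pv_E1 u "kick.com/" (by decide), pv_E2 _ "?" (by decide), pv_E2 _ "/" (by decide)]
      · rw [if_neg c7, if_neg c7]
        by_cases c8 : PySem.Str.isIn "streamable.com/" u
        · rw [if_pos c8, if_pos c8, pv_E1 u "streamable.com/" (by decide), pv_E2 _ "?" (by decide)]
        · rw [if_neg c8, if_neg c8]

-- A's chain from the YouTube-watch test on equals B's pvYoutube/pvOther combination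
lemma pv_rest_eq (u : String) :
    (if PySem.Str.isIn "youtube.com/watch" u then
      let vid := (pvSplit ((pvSplit u "?").getLastD "") "&").foldl
        (fun vid part => if PySem.Str.startswith part "v=" then PySem.Str.slice part (some 2) none else vid) ""
      if !(vid == "") then PySem.Str.join "" ["https://www.youtube.com/embed/", vid, "?autoplay=0"]
      else pvRestA u
    else pvRestA u) =
      (match (match pvYoutube u with | some x => some x | none => pvOther u) with
       | some x => x
       | none => u) := by
  by_cases c4 : PySem.Str.isIn "youtube.com/watch" u
  · rw [if_pos c4]
    simp only [pvYoutube, if_pos c4]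
    rw [pv_E1 u "?" (by decide)]
    rw [pv_Y]
    simp only [pvSplit]
    cases hfv : pvFirstV ((PySem.Str.split? (pvTailS u "?") "&").getD []).reverse with
    | none =>
      rw [if_neg (by simp)]
      rw [pv_restA_eq]
      exact pv_match_assoc _ _ u
    | some p =>
      simp only [hfv]
      by_cases he : PySem.Str.slice p (some 2) none == ""
      · rw [if_neg (by simpa using he), if_neg (by simpa using he)]
        rw [pv_restA_eq]
        exact pv_match_assoc _ _ u
      · rw [if_pos (by simpa using he), if_pos (by simpa using he)]
  · rw [if_neg c4]
    simp only [pvYoutube, if_neg c4]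
    rw [pv_restA_eq]
    exact pv_match_assoc _ _ u

lemma pv_nott (b : Bool) (h : ¬ b = true) : b = false := by
  cases b
  · rfl
  · exact absurd rfl h

-- ===== VERDICT (by name: the statement is the Claim_ definition above) =====
theorem detect_embed_py_spec : Claim_equal_detect_embed_py := by
  intro url _
  unfold Spec_detect_embed_py
  simp only [detect_embed_py, detect_embed_py_alt]
  by_cases h0 : url == ""
  · rw [if_pos h0, if_pos h0]
  · rw [if_neg h0, if_neg h0]
    generalize PySem.Str.strip url = u
    have h31 : ("twitch.tv/" : String).toList <:+: ("twitch.tv/videos/" : String).toList := by decide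
    have h32 : ("/videos/" : String).toList <:+: ("twitch.tv/videos/" : String).toList := by decide
    by_cases c1 : PySem.Str.isIn "twitch.tv/" u
    · by_cases c2 : PySem.Str.isIn "/videos/" u
      · rw [if_neg (by rw [c1, c2]; decide)]
        by_cases c3 : PySem.Str.isIn "twitch.tv/videos/" u
        · rw [if_pos c3]
          have hb : pvTwitch u = some (PySem.Str.join "" ["https://player.twitch.tv/?video=",
              pvHeadS (pvTailS u "/videos/") "?", "&parent=triptokforge.org&autoplay=false"]) := by
            rw [pvTwitch, if_neg (by rw [c1]; decide), if_neg (by rw [c2]; decide), if_pos c3]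
          rw [hb, pv_E1 u "/videos/" (by decide), pv_E2 _ "?" (by decide)]
        · have hb : pvTwitch u = none := by
            rw [pvTwitch, if_neg (by rw [c1]; decide), if_neg (by rw [c2]; decide), if_neg c3]
          rw [if_neg c3, hb]
          exact pv_rest_eq u
      · rw [if_pos (by rw [c1, pv_nott _ c2]; decide)]
        have hb : pvTwitch u = some (PySem.Str.join "" ["https://player.twitch.tv/?channel=",
            pvHeadS (pvHeadS (pvTailS u "twitch.tv/") "?") "/",
            "&parent=triptokforge.org&autoplay=false&muted=false"]) := by
          rw [pvTwitch, if_neg (by rw [c1]; decide), if_pos (by rw [pv_nott _ c2]; decide)]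
        rw [hb, pv_E1 u "twitch.tv/" (by decide), pv_E2 _ "?" (by decide), pv_E2 _ "/" (by decide)]
    · have c3 : ¬ PySem.Str.isIn "twitch.tv/videos/" u = true := fun h => c1 (pv_isIn_mono h31 h)
      have hb : pvTwitch u = none := by rw [pvTwitch, if_pos (by rw [pv_nott _ c1]; decide)]
      rw [if_neg (by rw [pv_nott _ c1, Bool.false_and]; decide), if_neg c3, hb]
      exact pv_rest_eq u
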